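-- pv_equiv track=rewrite | github.com/LorD-222/Obsidian-NoteScript | Scripts/data_analysis/Unused_files_finder.py | extract_links_from_content
-- ===== SOURCE A (Python) =====
-- def extract_links_from_content(content):
--     links = set()
--     start_idx = content.find('[[')
--
--     # Пока в содержимом есть ссылки
--     while start_idx != -1:
--         end_idx = content.find(']]', start_idx)
--         if end_idx != -1:
--             link = content[start_idx+2:end_idx]
--             links.add(link)
--         start_idx = content.find('[[', end_idx)
--
--     return links
-- ===== SOURCE B (Python) =====
-- def extract_links_from_content(content):
--     # Single left-to-right character scan (two-state automaton) instead of
--     # repeated str.find + slicing: outside a link we look for '[['; inside we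
--     # collect characters until the first ']]'.  An unclosed trailing '[[' is
--     # dropped, exactly as in the find-based version.
--     links = set()
--     n = len(content)
--     i = 0
--     buf = None  # None = outside a link; else list of collected link chars
--     while i < n:
--         if buf is None:
--             if content.startswith('[[', i):
--                 buf = []
--                 i += 2
--             else:
--                 i += 1
--         else:
--             if content.startswith(']]', i):
--                 links.add(''.join(buf))
--                 buf = None
--                 i += 2
--             else:
--                 buf.append(content[i])
--                 i += 1
--     return links
-- ===== Notes on version B (the rewrite author's own statement) =====
-- stated objective: alternative
-- what changed: Replaces the repeated str.find('[[')/str.find(']]') index-jumping loop with slicing by a single left-to-right two-state character scan that collects link characters directly.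
import Mathlib
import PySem

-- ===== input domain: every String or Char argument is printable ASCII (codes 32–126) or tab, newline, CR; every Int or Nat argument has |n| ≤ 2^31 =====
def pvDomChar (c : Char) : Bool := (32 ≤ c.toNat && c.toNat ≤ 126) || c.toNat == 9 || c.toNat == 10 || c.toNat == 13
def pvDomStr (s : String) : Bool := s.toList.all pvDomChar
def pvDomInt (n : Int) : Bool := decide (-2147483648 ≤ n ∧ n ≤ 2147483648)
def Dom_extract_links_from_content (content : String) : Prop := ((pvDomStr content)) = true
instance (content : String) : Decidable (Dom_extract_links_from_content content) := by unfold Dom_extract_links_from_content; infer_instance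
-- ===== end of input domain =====

-- B replaces A's repeated str.find('[[')/str.find(']]') index jumps and slicing by a single
-- left-to-right two-state character scan (objective: alternative, same cost).

-- ===== PORT A =====
-- Transliteration of A over content.toList: PySem.Chars.find/findFrom = Python str.find
-- (with and without a start argument), PySem.List.slice = content[i:j], PySem.Set = the links set.
-- The fuel argument only makes the while-loop total; it is never exhausted, since
-- start_idx strictly increases on every iteration (proved inside pv_main below).
def pvLBr : List Char := ['[', '[']
def pvRBr : List Char := [']', ']']

def extract_links_loop (cs : List Char) (links : PySem.Set String) (start_idx : Int) : Nat → PySem.Set String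
  | 0 => links
  | fuel + 1 =>
    if start_idx = -1 then links
    else
      let end_idx := PySem.Chars.findFrom cs pvRBr start_idx
      let links' := if end_idx ≠ -1 then
          PySem.Set.add links (String.ofList (PySem.List.slice cs (some (start_idx + 2)) (some end_idx)))
        else links
      extract_links_loop cs links' (PySem.Chars.findFrom cs pvLBr end_idx) fuel

def extract_links_from_content (content : String) : List String :=
  extract_links_loop content.toList PySem.Set.empty (PySem.Chars.find content.toList pvLBr) (content.toList.length + 2)

-- ===== PORT B =====
-- Transliteration of B's two-state scan: the outside state of Source B's loop (buf is None,
-- looking for '[[') is pvFindall, the inside state (buf collecting link chars until the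
-- first ']]') is pvScanClose; Source B's set of collected links is PySem.Set.ofList of the
-- collected links in scan order. pvScanClose_length is only cited by pvFindall's
-- termination proof.
def pvScanClose : List Char → Option (List Char × List Char)
  | [] => none
  | [_] => none
  | c1 :: c2 :: rest =>
    if c1 = ']' ∧ c2 = ']' then some ([], rest)
    else (pvScanClose (c2 :: rest)).map (fun p => (c1 :: p.1, p.2))
termination_by l => l.length

lemma pvScanClose_length (l : List Char) : ∀ (link rest' : List Char),
    pvScanClose l = some (link, rest') → link.length + 2 + rest'.length = l.length := by
  induction l using pvScanClose.induct with
  | case4 c1 c2 rest hne ih =>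
    intro link rest' h
    rw [pvScanClose, if_neg (by tauto)] at h
    cases hsc : pvScanClose (c2 :: rest) with
    | none => rw [hsc] at h; simp at h
    | some p =>
      rw [hsc] at h; simp at h
      have := ih p.1 p.2 (by rw [hsc])
      obtain ⟨h1, h2⟩ := h
      subst h1; subst h2
      simp at this ⊢; omega
  | _ => intro link rest' h <;> simp_all [pvScanClose] <;> omega

def pvFindall : List Char → List (List Char)
  | [] => []
  | [_] => []
  | c1 :: c2 :: rest =>
    if c1 = '[' ∧ c2 = '[' then
      match h : pvScanClose rest with
      | some (link, rest') => link :: pvFindall rest'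
      | none => []
    else pvFindall (c2 :: rest)
termination_by l => l.length
decreasing_by
  · have := pvScanClose_length rest link rest' h; simp; omega
  · simp

def extract_links_from_content_alt (content : String) : List String :=
  PySem.Set.ofList ((pvFindall content.toList).map (fun link => String.ofList link))

-- ===== PRECONDITION & SPEC =====
def Spec_extract_links_from_content (content : String) (out : List String) : Prop := out = extract_links_from_content_alt content
instance (content : String) (out : List String) : Decidable (Spec_extract_links_from_content content out) := by unfold Spec_extract_links_from_content; infer_instance

-- ===== CLAIM (what is proved, stated in full; the proofs are below) =====
def Claim_equal_extract_links_from_content : Prop := ∀ (content : String), Dom_extract_links_from_content content → Spec_extract_links_from_content content (extract_links_from_content content)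

-- ===== LEMMAS AND PROOFS =====

lemma pv_infix_iff_drop {sub l : List Char} : sub <:+: l ↔ ∃ j, sub <+: l.drop j := by
  constructor
  · intro h
    obtain ⟨t, hp, hs⟩ := List.infix_iff_prefix_suffix.mp h
    exact ⟨l.length - t.length, by rwa [← List.suffix_iff_eq_drop.mp hs]⟩
  · rintro ⟨j, hp⟩
    exact List.infix_iff_prefix_suffix.mpr ⟨l.drop j, hp, List.drop_suffix j l⟩

lemma pv_findFrom_eq_of_first (l sub : List Char) (k n : Nat) (hk : k ≤ l.length) (hkn : k ≤ n)
    (hpre : sub <+: l.drop n) (hmin : ∀ i, k ≤ i → i < n → ¬ sub <+: l.drop i) :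
    PySem.Chars.findFrom l sub ↑k = ↑n := by
  have hinf : sub <:+: l.drop k := by
    refine pv_infix_iff_drop.mpr ⟨n - k, ?_⟩
    rw [List.drop_drop]
    rwa [show k + (n - k) = n by omega]
  have hne : PySem.Chars.findFrom l sub ↑k ≠ -1 :=
    fun heq => ((PySem.Chars.findFrom_natCast_eq_neg_one_iff l sub k hk).mp heq) hinf
  obtain ⟨hge, hpre', hmin'⟩ := PySem.Chars.findFrom_natCast_spec l sub k hk hne
  have h0 : (0:Int) ≤ PySem.Chars.findFrom l sub ↑k := le_trans (by exact_mod_cast Nat.zero_le k) hge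
  have hfv : PySem.Chars.findFrom l sub ↑k = ↑(PySem.Chars.findFrom l sub ↑k).toNat :=
    (Int.toNat_of_nonneg h0).symm
  set f := (PySem.Chars.findFrom l sub ↑k).toNat with hfdef
  have hkf : k ≤ f := by
    have : (↑k:Int) ≤ ↑f := by rw [← hfv]; exact hge
    exact_mod_cast this
  rcases lt_trichotomy f n with hlt | heq | hgt
  · exact absurd hpre' (hmin f hkf hlt)
  · rw [hfv, heq]
  · exact absurd hpre (hmin' n hkn hgt)

lemma pv_find_small (l sub : List Char) (h : l.length < sub.length) : PySem.Chars.find l sub = -1 := by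
  rw [PySem.Chars.find_eq_neg_one_iff]
  intro hinf
  have := hinf.length_le
  omega

lemma pv_findFrom_neg_one (l sub : List Char) (hs : 2 ≤ sub.length) :
    PySem.Chars.findFrom l sub (-1) = -1 := by
  unfold PySem.Chars.findFrom
  split
  next h =>
    dsimp only
    rw [if_pos (by norm_num : (-1:Int) < 0)]
    have key : ∀ st : Int, 0 ≤ st → (l.length:Int) - 1 ≤ st →
        PySem.Chars.find (List.drop st.toNat (List.take ((l.length:Int)).toNat l)) sub = -1 := by
      intro st h0 hge
      apply pv_find_small
      simp only [List.length_drop, List.length_take]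
      omega
    split_ifs with h1 h2 h3 h4 h5 <;>
      first
        | rfl
        | (exfalso; exact h3 (key 0 le_rfl (by omega)))
        | (exfalso; exact h5 (key (-1 + (l.length:Int)) (by omega) (by omega)))
  next e h => exact absurd h (by simp)

lemma pv_skip2 (l sub : List Char) (en : Nat) (h2 : en + 2 ≤ l.length)
    (h0 : ¬ sub <+: l.drop en) (h1 : ¬ sub <+: l.drop (en + 1)) :
    PySem.Chars.findFrom l sub ↑en = PySem.Chars.findFrom l sub ↑(en + 2) := by
  by_cases hc : sub <:+: l.drop (en + 2)
  · have hne : PySem.Chars.findFrom l sub ↑(en+2) ≠ -1 :=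
      fun heq => ((PySem.Chars.findFrom_natCast_eq_neg_one_iff l sub (en+2) h2).mp heq) hc
    obtain ⟨hge, hpre, hmin⟩ := PySem.Chars.findFrom_natCast_spec l sub (en+2) h2 hne
    have hnn : (0:Int) ≤ PySem.Chars.findFrom l sub ↑(en+2) :=
      le_trans (by exact_mod_cast Nat.zero_le (en+2)) hge
    have hfv : PySem.Chars.findFrom l sub ↑(en+2) = ↑(PySem.Chars.findFrom l sub ↑(en+2)).toNat :=
      (Int.toNat_of_nonneg hnn).symm
    set n := (PySem.Chars.findFrom l sub ↑(en+2)).toNat with hn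
    have h2n : en + 2 ≤ n := by
      have : ((en:Int) + 2) ≤ ↑n := by rw [← hfv]; exact_mod_cast hge
      exact_mod_cast this
    rw [hfv]
    apply pv_findFrom_eq_of_first l sub en n (by omega) (by omega) hpre
    intro i hi hin
    rcases Nat.lt_or_ge i (en+2) with hilt | hige
    · have : i = en ∨ i = en + 1 := by omega
      rcases this with rfl | rfl
      · exact h0
      · exact h1
    · exact hmin i hige hin
  · have hr : PySem.Chars.findFrom l sub ↑(en+2) = -1 :=
      (PySem.Chars.findFrom_natCast_eq_neg_one_iff l sub (en+2) h2).mpr hc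
    rw [hr]
    apply (PySem.Chars.findFrom_natCast_eq_neg_one_iff l sub en (by omega)).mpr
    intro hinf
    obtain ⟨j, hp⟩ := pv_infix_iff_drop.mp hinf
    rw [List.drop_drop] at hp
    rcases Nat.lt_or_ge j 2 with hj | hj
    · have : j = 0 ∨ j = 1 := by omega
      rcases this with rfl | rfl
      · simp only [Nat.add_zero] at hp; exact h0 hp
      · exact h1 hp
    · apply hc
      refine pv_infix_iff_drop.mpr ⟨j - 2, ?_⟩
      rw [List.drop_drop]
      rwa [show en + 2 + (j - 2) = en + j by omega]

lemma pvScanClose_none (l : List Char) : pvScanClose l = none ↔ ¬ (pvRBr <:+: l) := by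
  induction l using pvScanClose.induct with
  | case1 => simp [pvScanClose, pvRBr]
  | case2 c =>
    simp [pvScanClose, pvRBr]
    intro h; have := h.length_le; simp at this
  | case3 c1 c2 rest hyp =>
    obtain ⟨g1, g2⟩ := hyp; subst g1; subst g2
    have hin : pvRBr <:+: ']' :: ']' :: rest := ⟨[], rest, by simp [pvRBr]⟩
    simp [pvScanClose, hin]
  | case4 c1 c2 rest hne ih =>
    rw [pvScanClose, if_neg (by tauto)]
    rw [Option.map_eq_none_iff, ih]
    constructor
    · intro h hin
      rcases List.infix_cons_iff.mp hin with hp | hi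
      · rcases hp with ⟨t, ht⟩
        simp [pvRBr] at ht
        tauto
      · exact h hi
    · intro h hin
      exact h (List.infix_cons hin)

lemma pvScanClose_some (l : List Char) : ∀ (link rest' : List Char),
    pvScanClose l = some (link, rest') →
    l = link ++ ']' :: ']' :: rest' ∧ ∀ i < link.length, ¬ pvRBr <+: l.drop i := by
  induction l using pvScanClose.induct with
  | case1 => intro link rest' h; simp [pvScanClose] at h
  | case2 c => intro link rest' h; simp [pvScanClose] at h
  | case3 c1 c2 rest hyp =>
    obtain ⟨g1, g2⟩ := hyp; subst g1; subst g2
    intro link rest' h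
    rw [pvScanClose, if_pos ⟨rfl, rfl⟩] at h
    simp at h
    obtain ⟨h1, h2⟩ := h; subst h1; subst h2
    exact ⟨by simp, by intro i hi; simp at hi⟩
  | case4 c1 c2 rest hne ih =>
    intro link rest' h
    rw [pvScanClose, if_neg (by tauto)] at h
    cases hsc : pvScanClose (c2 :: rest) with
    | none => rw [hsc] at h; simp at h
    | some p =>
      rw [hsc] at h; simp at h
      obtain ⟨h1, h2⟩ := h
      obtain ⟨hshape, hmin⟩ := ih p.1 p.2 (by rw [hsc])
      subst h1; subst h2
      constructor
      · simpa using hshape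
      · intro i hi
        cases i with
        | zero =>
          simp only [List.drop_zero]
          rintro ⟨t, ht⟩
          simp [pvRBr] at ht
          tauto
        | succ j =>
          simp only [List.length_cons] at hi
          have := hmin j (by omega)
          simpa using this

lemma pvFindall_nil : pvFindall [] = [] := by simp [pvFindall]

lemma pvFindall_skip1 (c : Char) (l : List Char) (h : ¬ pvLBr <+: (c :: l)) :
    pvFindall (c :: l) = pvFindall l := by
  cases l with
  | nil => simp [pvFindall]
  | cons c2 rest =>
    rw [pvFindall, if_neg]
    rintro ⟨g1, g2⟩; subst g1; subst g2
    exact h ⟨rest, by simp [pvLBr]⟩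

lemma pvFindall_hit_some (rest link rest' : List Char) (hsc : pvScanClose rest = some (link, rest')) :
    pvFindall ('[' :: '[' :: rest) = link :: pvFindall rest' := by
  rw [pvFindall, if_pos ⟨rfl, rfl⟩]
  split
  next l r heq => rw [hsc] at heq; simp at heq; rw [heq.1, heq.2]
  next heq => rw [hsc] at heq; simp at heq

lemma pvFindall_hit_none (rest : List Char) (hsc : pvScanClose rest = none) :
    pvFindall ('[' :: '[' :: rest) = [] := by
  rw [pvFindall, if_pos ⟨rfl, rfl⟩]
  split
  next l r heq => rw [hsc] at heq; simp at heq
  next heq => rfl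

lemma pvFindall_skip : ∀ (j : Nat) (l : List Char), j ≤ l.length →
    (∀ i < j, ¬ pvLBr <+: l.drop i) → pvFindall l = pvFindall (l.drop j) := by
  intro j
  induction j with
  | zero => intro l _ _; simp
  | succ j ih =>
    intro l hlen hmin
    cases l with
    | nil => simp at hlen
    | cons c t =>
      rw [pvFindall_skip1 c t (by simpa using hmin 0 (by omega))]
      rw [ih t (by simp at hlen; omega) (fun i hi => by simpa using hmin (i+1) (by omega))]
      rfl

lemma pvFindall_none (l : List Char) (h : ¬ pvLBr <:+: l) : pvFindall l = [] := by
  rw [pvFindall_skip l.length l le_rfl]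
  · simp [pvFindall_nil]
  · intro i _ hp
    exact h (pv_infix_iff_drop.mpr ⟨i, hp⟩)

lemma pv_loop_neg (cs : List Char) (links : PySem.Set String) (fuel : Nat) (h : 1 ≤ fuel) :
    extract_links_loop cs links (-1) fuel = links := by
  cases fuel with
  | zero => omega
  | succ f => simp [extract_links_loop]

lemma pv_main (cs : List Char) : ∀ (N k : Nat) (links : PySem.Set String) (fuel : Nat),
    k ≤ cs.length → cs.length - k ≤ N → cs.length - k + 2 ≤ fuel →
    extract_links_loop cs links (PySem.Chars.findFrom cs pvLBr ↑k) fuel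
      = ((pvFindall (cs.drop k)).map (fun link => String.ofList link)).foldl PySem.Set.add links := by
  intro N
  induction N with
  | zero =>
    intro k links fuel hk hN hfuel
    have hkeq : k = cs.length := by omega
    subst hkeq
    have hneg : PySem.Chars.findFrom cs pvLBr ↑cs.length = -1 := by
      apply (PySem.Chars.findFrom_natCast_eq_neg_one_iff cs pvLBr cs.length le_rfl).mpr
      simp [List.drop_length, pvLBr]
    rw [hneg, pv_loop_neg cs links fuel (by omega)]
    simp [List.drop_length, pvFindall_nil]
  | succ N ih =>
    intro k links fuel hk hN hfuel
    by_cases hf : PySem.Chars.findFrom cs pvLBr ↑k = -1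
    · rw [hf, pv_loop_neg cs links fuel (by omega)]
      have hni : ¬ pvLBr <:+: cs.drop k :=
        (PySem.Chars.findFrom_natCast_eq_neg_one_iff cs pvLBr k hk).mp hf
      rw [pvFindall_none _ hni]
      simp
    · obtain ⟨hge, hpreM, hminM⟩ := PySem.Chars.findFrom_natCast_spec cs pvLBr k hk hf
      have hm0 : (0:Int) ≤ PySem.Chars.findFrom cs pvLBr ↑k :=
        le_trans (by exact_mod_cast Nat.zero_le k) hge
      set m := PySem.Chars.findFrom cs pvLBr ↑k with hmdef
      set mn := m.toNat with hmndef
      have hmval : m = ↑mn := (Int.toNat_of_nonneg hm0).symm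
      have hkmn : k ≤ mn := by rw [hmval] at hge; exact_mod_cast hge
      obtain ⟨tl, htl⟩ := hpreM
      have hdropmn : cs.drop mn = '[' :: '[' :: tl := by rw [← htl]; simp [pvLBr]
      have htl_eq : cs.drop (mn + 2) = tl := by
        have h2 := congrArg (List.drop 2) hdropmn
        rw [List.drop_drop] at h2
        simpa [Nat.add_comm] using h2
      have hmn2 : mn + 2 ≤ cs.length := by
        have hlen := congrArg List.length hdropmn
        simp [List.length_drop] at hlen
        omega
      obtain ⟨f, rfl⟩ : ∃ f, fuel = f + 1 := ⟨fuel - 1, by omega⟩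
      simp only [extract_links_loop]
      rw [if_neg (show ¬ m = -1 by rw [hmval]; omega)]
      by_cases he : PySem.Chars.findFrom cs pvRBr m = -1
      · rw [he]
        rw [if_neg (by simp)]
        rw [pv_findFrom_neg_one cs pvLBr (by simp [pvLBr])]
        rw [pv_loop_neg cs links f (by omega)]
        have hniR : ¬ pvRBr <:+: cs.drop mn := by
          apply (PySem.Chars.findFrom_natCast_eq_neg_one_iff cs pvRBr mn (by omega)).mp
          rw [← hmval]; exact he
        have hskip : pvFindall (cs.drop k) = pvFindall (cs.drop mn) := by
          rw [pvFindall_skip (mn - k) (cs.drop k) (by simp [List.length_drop]; omega)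
            (fun i hi => by
              rw [List.drop_drop]
              exact hminM (k + i) (by omega) (by omega))]
          rw [List.drop_drop, show k + (mn - k) = mn by omega]
        rw [hskip, hdropmn]
        rw [pvFindall_hit_none tl ((pvScanClose_none tl).mpr
          (fun hinf => hniR (by rw [hdropmn]; exact List.infix_cons (List.infix_cons hinf))))]
        simp
      · have hme : PySem.Chars.findFrom cs pvRBr m = PySem.Chars.findFrom cs pvRBr ↑mn := by
          rw [hmval]
        rw [hme] at he
        obtain ⟨hgeE, hpreE, hminE⟩ := PySem.Chars.findFrom_natCast_spec cs pvRBr mn (by omega) he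
        have he0 : (0:Int) ≤ PySem.Chars.findFrom cs pvRBr ↑mn :=
          le_trans (by exact_mod_cast Nat.zero_le mn) hgeE
        set en := (PySem.Chars.findFrom cs pvRBr ↑mn).toNat with hendef
        have heval : PySem.Chars.findFrom cs pvRBr ↑mn = ↑en := (Int.toNat_of_nonneg he0).symm
        have hmn_en : mn ≤ en := by rw [heval] at hgeE; exact_mod_cast hgeE
        have hd1 : cs.drop (mn + 1) = '[' :: tl := by
          have h2 := congrArg (List.drop 1) hdropmn
          rw [List.drop_drop] at h2
          simpa [Nat.add_comm] using h2
        have hen2 : mn + 2 ≤ en := by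
          by_contra hcon
          have : en = mn ∨ en = mn + 1 := by omega
          rcases this with hcase | hcase
          · rw [hcase] at hpreE
            obtain ⟨t, ht⟩ := hpreE
            rw [hdropmn] at ht
            simp [pvRBr] at ht
          · rw [hcase] at hpreE
            obtain ⟨t, ht⟩ := hpreE
            rw [hd1] at ht
            simp [pvRBr] at ht
        have hinf_tl : pvRBr <:+: tl := by
          refine pv_infix_iff_drop.mpr ⟨en - (mn + 2), ?_⟩
          rw [← htl_eq, List.drop_drop, show mn + 2 + (en - (mn + 2)) = en by omega]
          exact hpreE
        cases hsc : pvScanClose tl with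
        | none => exact absurd ((pvScanClose_none tl).mp hsc) (not_not_intro hinf_tl)
        | some p =>
          obtain ⟨link, rest'⟩ := p
          obtain ⟨hshape, hminS⟩ := pvScanClose_some tl link rest' hsc
          have hshape' : tl = (link ++ [']', ']']) ++ rest' := by rw [hshape]; simp
          have henval : en = mn + 2 + link.length := by
            have hpj : pvRBr <+: cs.drop (mn + 2 + link.length) := by
              rw [show mn + 2 + link.length = mn + 2 + link.length by rfl, ← List.drop_drop (j := mn + 2)]
              rw [htl_eq, hshape]
              rw [List.drop_left]
              exact ⟨rest', by simp [pvRBr]⟩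
            have hle : en ≤ mn + 2 + link.length := by
              by_contra hlt
              rw [not_le] at hlt
              exact (hminE (mn + 2 + link.length) (by omega) (by omega)) hpj
            by_contra hne2
            have hlt : en < mn + 2 + link.length := by omega
            have hcontra := hminS (en - (mn + 2)) (by omega)
            apply hcontra
            rw [← htl_eq, List.drop_drop, show mn + 2 + (en - (mn + 2)) = en by omega]
            exact hpreE
          have hdropen : cs.drop en = ']' :: ']' :: rest' := by
            rw [henval, ← List.drop_drop (j := mn + 2), htl_eq, hshape, List.drop_left]
          have hen2len : en + 2 ≤ cs.length := by
            have hlen := congrArg List.length hdropen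
            simp [List.length_drop] at hlen
            omega
          have hrest' : cs.drop (en + 2) = rest' := by
            have h2 := congrArg (List.drop 2) hdropen
            rw [List.drop_drop] at h2
            simpa [Nat.add_comm] using h2
          rw [if_pos (show ¬ PySem.Chars.findFrom cs pvRBr m = -1 by rw [hme, heval]; omega)]
          have hslice : PySem.List.slice cs (some (m + 2)) (some (PySem.Chars.findFrom cs pvRBr m)) = link := by
            rw [hme, heval, hmval]
            rw [show ((mn:Int) + 2) = ((mn + 2 : Nat) : Int) by push_cast; ring]
            rw [PySem.List.slice_natCast]
            rw [htl_eq, henval, show mn + 2 + link.length - (mn + 2) = link.length by omega]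
            rw [hshape]
            exact List.take_left
          have hnext : PySem.Chars.findFrom cs pvLBr (PySem.Chars.findFrom cs pvRBr m)
              = PySem.Chars.findFrom cs pvLBr ↑(en + 2) := by
            rw [hme, heval]
            apply pv_skip2 cs pvLBr en hen2len
            · rw [hdropen]; rintro ⟨t, ht⟩; simp [pvLBr] at ht
            · have hd1' : cs.drop (en + 1) = ']' :: rest' := by
                have h2 := congrArg (List.drop 1) hdropen
                rw [List.drop_drop] at h2
                simpa [Nat.add_comm] using h2
              rw [hd1']; rintro ⟨t, ht⟩; simp [pvLBr] at ht
          rw [hslice, hnext]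
          rw [ih (en + 2) (PySem.Set.add links (String.ofList link)) f hen2len (by omega) (by omega)]
          have hRHS : pvFindall (cs.drop k) = link :: pvFindall (cs.drop (en + 2)) := by
            rw [pvFindall_skip (mn - k) (cs.drop k) (by simp [List.length_drop]; omega)
              (fun i hi => by
                rw [List.drop_drop]
                exact hminM (k + i) (by omega) (by omega))]
            rw [List.drop_drop, show k + (mn - k) = mn by omega, hdropmn]
            rw [pvFindall_hit_some tl link rest' hsc]
            rw [hrest']
          rw [hRHS]
          simp only [List.map_cons, List.foldl_cons]

-- ===== VERDICT (by name: the statement is the Claim_ definition above) =====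
theorem extract_links_from_content_spec : Claim_equal_extract_links_from_content := by
  intro content _
  unfold Spec_extract_links_from_content extract_links_from_content extract_links_from_content_alt
  rw [← PySem.Chars.findFrom_zero content.toList pvLBr]
  rw [show (0:Int) = ((0:Nat):Int) by simp]
  rw [pv_main content.toList content.toList.length 0 PySem.Set.empty (content.toList.length + 2)
    (by omega) (by omega) (by omega)]
  rw [PySem.Set.ofList_eq_foldl]
  rfl
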